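-- pv_equiv track=rewrite | github.com/everythingfades/Math-Stats-AP | 生日悖论/simulation.py | getSame
-- ===== SOURCE A (Python) =====
-- def getSame(birthdays):
--     cnt = 0
--     x = list()
--     y = list()
--     z = list()
--     for i in range(len(birthdays)):
--         for j in range(i+1,len(birthdays)):
--             if birthdays[i] == birthdays[j]:
--                 cnt += 1
--                 x.append(i)
--                 y.append(j)
--                 z.append(birthdays[i])
--     return cnt,x,y,z
-- ===== SOURCE B (Python) =====
-- def getSame(birthdays):
--     # Group indices by value once, then per position emit the later same-value
--     # indices as a ready-made slice: O(n + P) instead of A's O(n^2) double scan.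
--     groups = {}
--     for i, v in enumerate(birthdays):
--         groups.setdefault(v, []).append(i)
--     cnt = 0
--     x = []
--     y = []
--     z = []
--     seen = {}
--     for i, v in enumerate(birthdays):
--         k = seen.get(v, 0)
--         later = groups[v][k + 1:]
--         cnt += len(later)
--         x.extend([i] * len(later))
--         y.extend(later)
--         z.extend([v] * len(later))
--         seen[v] = k + 1
--     return cnt, x, y, z
-- ===== Notes on version B (the rewrite author's own statement) =====
-- stated objective: faster
-- what changed: Replaces A's nested all-pairs double scan with a single dict pass grouping indices by value, then per position emits the later same-value indices as a ready-made slice of the group list, so no inner scan over the whole list remains.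
import Mathlib
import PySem

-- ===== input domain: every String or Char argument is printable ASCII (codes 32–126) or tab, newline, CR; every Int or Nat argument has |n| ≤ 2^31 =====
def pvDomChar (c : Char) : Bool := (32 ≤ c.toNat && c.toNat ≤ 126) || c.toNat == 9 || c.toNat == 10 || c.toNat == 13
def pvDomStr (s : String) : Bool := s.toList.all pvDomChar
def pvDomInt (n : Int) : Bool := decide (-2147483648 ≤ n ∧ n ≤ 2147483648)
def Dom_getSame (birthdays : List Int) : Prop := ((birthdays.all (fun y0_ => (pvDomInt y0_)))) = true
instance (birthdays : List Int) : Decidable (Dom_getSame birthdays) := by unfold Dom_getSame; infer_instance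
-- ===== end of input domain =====

-- B groups indices by value in one dict pass and emits each position's later same-value
-- indices as a slice of its group, instead of A's nested all-pairs scan (objective: faster).

-- ===== PORT A =====
-- indices i, j always lie in range, so birthdays[i] is ported as pyGetD with default 0 (exact here)
def getSame (birthdays : List Int) : Int × List Int × List Int × List Int :=
  (PySem.List.pyRange 0 (PySem.List.len birthdays) 1).foldl (fun st i =>
    (PySem.List.pyRange (i + 1) (PySem.List.len birthdays) 1).foldl (fun st j =>
      if PySem.List.pyGetD birthdays i 0 = PySem.List.pyGetD birthdays j 0 then
        (st.1 + 1, st.2.1 ++ [i], st.2.2.1 ++ [j], st.2.2.2 ++ [PySem.List.pyGetD birthdays i 0])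
      else st) st)
    (0, [], [], [])

-- ===== PORT B =====
def getSame_alt (birthdays : List Int) : Int × List Int × List Int × List Int :=
  -- groups.setdefault(v, []).append(i)
  let groups : PySem.Dict Int (List Int) :=
    (PySem.List.enumerate birthdays 0).foldl
      (fun d p => d.modify p.2 [] (· ++ [p.1])) PySem.Dict.empty
  let r :=
    (PySem.List.enumerate birthdays 0).foldl
      (fun st p =>
        let k := st.2.2.2.2.getD p.2 0
        let later := PySem.List.slice (groups.getD p.2 []) (some (k + 1)) none
        (st.1 + PySem.List.len later,
         st.2.1 ++ List.replicate later.length p.1,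
         st.2.2.1 ++ later,
         st.2.2.2.1 ++ List.replicate later.length p.2,
         st.2.2.2.2.insert p.2 (k + 1)))
      ((0 : Int), ([] : List Int), ([] : List Int), ([] : List Int),
       (PySem.Dict.empty : PySem.Dict Int Int))
  (r.1, r.2.1, r.2.2.1, r.2.2.2.1)

-- ===== PRECONDITION & SPEC =====
def Spec_getSame (birthdays : List Int) (out : Int × List Int × List Int × List Int) : Prop := out = getSame_alt birthdays
instance (birthdays : List Int) (out : Int × List Int × List Int × List Int) : Decidable (Spec_getSame birthdays out) := by unfold Spec_getSame; infer_instance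

-- ===== CLAIM (what is proved, stated in full; the proofs are below) =====
def Claim_equal_getSame : Prop := ∀ (birthdays : List Int), Dom_getSame birthdays → Spec_getSame birthdays (getSame birthdays)

-- ===== LEMMAS AND PROOFS =====

-- the quadruple accumulator (cnt, x, y, z) extended by a batch of triples (i, j, v)
def pvPk (st : Int × List Int × List Int × List Int) (ts : List (Int × Int × Int)) :
    Int × List Int × List Int × List Int :=
  (st.1 + ts.length, st.2.1 ++ ts.map (·.1), st.2.2.1 ++ ts.map (·.2.1), st.2.2.2 ++ ts.map (·.2.2))

-- indices of the occurrences of v in b, in increasing order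
def pvOcc (b : List Int) (v : Int) : List Int :=
  ((PySem.List.enumerate b 0).filter (fun p => p.2 == v)).map (·.1)

-- the triples contributed by position p.1 holding value p.2
def pvContrib (b : List Int) (p : Int × Int) : List (Int × Int × Int) :=
  ((pvOcc b p.2).drop ((b.take p.1.toNat).count p.2 + 1)).map (fun j => (p.1, j, p.2))

theorem pvPk_nil (st : Int × List Int × List Int × List Int) : pvPk st [] = st := by
  simp [pvPk]

theorem pvPk_append (st : Int × List Int × List Int × List Int)
    (ts us : List (Int × Int × Int)) : pvPk (pvPk st ts) us = pvPk st (ts ++ us) := by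
  obtain ⟨c, x, y, z⟩ := st
  simp [pvPk]
  ring

-- A's inner loop: an if-append loop is pvPk of the filtered, mapped list
theorem pvFoldl_quad_if (p : Int → Prop) [DecidablePred p] (f1 f2 f3 : Int → Int) :
    ∀ (l : List Int) (st : Int × List Int × List Int × List Int),
      l.foldl (fun st j =>
          if p j then (st.1 + 1, st.2.1 ++ [f1 j], st.2.2.1 ++ [f2 j], st.2.2.2 ++ [f3 j])
          else st) st
        = pvPk st ((l.filter (fun j => decide (p j))).map (fun j => (f1 j, f2 j, f3 j))) := by
  intro l
  induction l with
  | nil => intro st; simp [pvPk_nil]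
  | cons a l ih =>
    intro st
    by_cases h : p a
    · simp only [List.foldl_cons, List.filter_cons, decide_eq_true_eq, h, if_true]
      rw [ih]
      have : (st.1 + 1, st.2.1 ++ [f1 a], st.2.2.1 ++ [f2 a], st.2.2.2 ++ [f3 a])
          = pvPk st [(f1 a, f2 a, f3 a)] := by simp [pvPk]
      rw [this, pvPk_append]
      simp
    · simp only [List.foldl_cons, List.filter_cons, decide_eq_true_eq, h, if_false]
      rw [ih]

-- A loop whose step is pvPk with a per-element batch is pvPk of the flatMap
theorem pvFoldl_pk_flat {α : Type} (F : α → List (Int × Int × Int)) :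
    ∀ (l : List α) (st : Int × List Int × List Int × List Int),
      l.foldl (fun st x => pvPk st (F x)) st = pvPk st (l.flatMap F) := by
  intro l
  induction l with
  | nil => intro st; simp [pvPk_nil]
  | cons a l ih =>
    intro st
    simp only [List.foldl_cons, List.flatMap_cons]
    rw [ih, pvPk_append]

-- A computes pvPk of its lexicographic pair scan
theorem pvA_eq (b : List Int) :
    getSame b = pvPk (0, [], [], [])
      ((PySem.List.pyRange 0 (PySem.List.len b) 1).flatMap (fun i =>
        ((PySem.List.pyRange (i + 1) (PySem.List.len b) 1).filter
            (fun j => decide (PySem.List.pyGetD b i 0 = PySem.List.pyGetD b j 0))).map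
          (fun j => (i, j, PySem.List.pyGetD b i 0)))) := by
  unfold getSame
  rw [PySem.List.foldl_congr_mem (g := fun st i => pvPk st
      (((PySem.List.pyRange (i + 1) (PySem.List.len b) 1).filter
          (fun j => decide (PySem.List.pyGetD b i 0 = PySem.List.pyGetD b j 0))).map
        (fun j => (i, j, PySem.List.pyGetD b i 0))))]
  · rw [pvFoldl_pk_flat]
  · intro st i _
    exact pvFoldl_quad_if (fun j => PySem.List.pyGetD b i 0 = PySem.List.pyGetD b j 0)
      (fun _ => i) (fun j => j) (fun _ => PySem.List.pyGetD b i 0) _ st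

-- number of occurrences of v among the values of an enumeration
theorem pvEnumFilterLen (v : Int) :
    ∀ (xs : List Int) (s : Int),
      ((PySem.List.enumerate xs s).filter (fun p => p.2 == v)).length = xs.count v := by
  intro xs
  induction xs with
  | nil => intro s; simp [PySem.List.enumerate_nil]
  | cons a xs ih =>
    intro s
    by_cases h : a = v
    · simp [PySem.List.enumerate_cons, h, ih]
    · simp [PySem.List.enumerate_cons, h, ih (s + 1)]

-- the groups dict built by B holds exactly the occurrence-index lists
theorem pvGroups_getD (b : List Int) (v : Int) :
    (((PySem.List.enumerate b 0).foldl
        (fun d p => d.modify p.2 [] (· ++ [p.1])) PySem.Dict.empty).getD v [])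
      = pvOcc b v := by
  have h : (PySem.List.enumerate b 0).foldl
        (fun d p => d.modify p.2 [] (· ++ [p.1])) PySem.Dict.empty
      = ((PySem.List.enumerate b 0).map Prod.swap).foldl
        (fun d q => d.modify q.1 [] (· ++ [q.2])) PySem.Dict.empty := by
    rw [List.foldl_map]
    rfl
  rw [h, PySem.Dict.getD_foldl_modify_append, List.filter_map, List.map_map]
  simp only [Function.comp_def, Prod.fst_swap, Prod.snd_swap]
  rfl

-- splitting the enumeration of b at an in-range position k
theorem pvEnumSplit (b : List Int) (k : Nat) (hk : k < b.length) :
    PySem.List.enumerate b 0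
      = PySem.List.enumerate (b.take k) 0 ++ ((k : Int), b[k])
        :: PySem.List.enumerate (b.drop (k + 1)) ((k : Int) + 1) := by
  conv_lhs => rw [← List.take_append_drop (k + 1) b]
  rw [PySem.List.enumerate_append]
  have ht : b.take (k + 1) = b.take k ++ [b[k]] := by
    rw [List.take_add_one]; simp [List.getElem?_eq_getElem hk]
  have hl : (b.take (k + 1)).length = k + 1 := by
    simp [List.length_take]; omega
  rw [hl, ht, PySem.List.enumerate_append, PySem.List.enumerate_cons,
    PySem.List.enumerate_nil]
  have : (b.take k).length = k := by simp [List.length_take]; omega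
  rw [this]
  simp

-- KEY: A's inner filtered range equals the tail of the occurrence list of b[k]
theorem pvKey (b : List Int) (k : Nat) (hk : k < b.length) :
    (PySem.List.pyRange ((k : Int) + 1) (PySem.List.len b) 1).filter
        (fun j => decide (b[k] = PySem.List.pyGetD b j 0))
      = (pvOcc b b[k]).drop ((b.take k).count b[k] + 1) := by
  have hdl : (b.drop (k + 1)).length = b.length - (k + 1) := by simp
  -- left side as a map over the enumeration of the tail
  have hr : PySem.List.pyRange ((k : Int) + 1) (PySem.List.len b) 1
      = (PySem.List.enumerate (b.drop (k + 1)) ((k : Int) + 1)).map (·.1) := by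
    rw [PySem.List.map_fst_enumerate, hdl]
    congr 1
    simp
    omega
  have hmemeq : ∀ p ∈ PySem.List.enumerate (b.drop (k + 1)) ((k : Int) + 1),
      (decide (b[k] = PySem.List.pyGetD b p.1 0)) = (p.2 == b[k]) := by
    intro p hp
    rw [PySem.List.mem_enumerate_iff] at hp
    obtain ⟨m, hm, rfl⟩ := hp
    have hidx : (k : Int) + 1 + (m : Int) = ((k + 1 + m : Nat) : Int) := by push_cast; ring
    have hlt : k + 1 + m < b.length := by omega
    have hget : PySem.List.pyGetD b ((k : Int) + 1 + (m : Int)) 0 = b[k + 1 + m] := by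
      rw [hidx, PySem.List.pyGetD_natCast, List.getD_eq_getElem b 0 hlt]
    have hdropm : (b.drop (k + 1))[m] = b[k + 1 + m] := List.getElem_drop ..
    simp only [hget, hdropm]
    by_cases h : b[k] = b[k + 1 + m]
    · simp [h]
    · simp [h]
      exact fun h' => h h'.symm
  rw [hr, List.filter_map]
  simp only [Function.comp_def]
  rw [List.filter_congr hmemeq]
  -- right side: split the occurrence list at position k
  have hocc : pvOcc b b[k]
      = ((PySem.List.enumerate (b.take k) 0).filter (fun p => p.2 == b[k])).map (·.1)
        ++ (k : Int)
        :: ((PySem.List.enumerate (b.drop (k + 1)) ((k : Int) + 1)).filter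
            (fun p => p.2 == b[k])).map (·.1) := by
    unfold pvOcc
    rw [pvEnumSplit b k hk]
    simp [List.filter_append]
  rw [hocc]
  have hlen : (((PySem.List.enumerate (b.take k) 0).filter
      (fun p => p.2 == b[k])).map (·.1)).length = (b.take k).count b[k] := by
    rw [List.length_map, pvEnumFilterLen]
  rw [← List.singleton_append, ← List.append_assoc]
  have hlen2 : (((PySem.List.enumerate (b.take k) 0).filter
      (fun p => p.2 == b[k])).map (·.1) ++ [(k : Int)]).length
      = (b.take k).count b[k] + 1 := by simp [hlen]
  rw [← hlen2, List.drop_left]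

-- B's second loop: the invariant run, for any split b = pref ++ suf with seen counting pref
theorem pvB_fold (b : List Int)
    (groups : PySem.Dict Int (List Int))
    (hg : ∀ v, groups.getD v [] = pvOcc b v) :
    ∀ (suf pref : List Int) (c : Int) (x y z : List Int) (seen : PySem.Dict Int Int),
      b = pref ++ suf →
      (∀ v, seen.getD v 0 = (pref.count v : Int)) →
      (let r := (PySem.List.enumerate suf ((pref.length : Nat) : Int)).foldl
          (fun st p =>
            let k := st.2.2.2.2.getD p.2 0
            let later := PySem.List.slice (groups.getD p.2 []) (some (k + 1)) none
            (st.1 + PySem.List.len later,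
             st.2.1 ++ List.replicate later.length p.1,
             st.2.2.1 ++ later,
             st.2.2.2.1 ++ List.replicate later.length p.2,
             st.2.2.2.2.insert p.2 (k + 1)))
          (c, x, y, z, seen)
       (r.1, r.2.1, r.2.2.1, r.2.2.2.1))
        = pvPk (c, x, y, z)
            ((PySem.List.enumerate suf ((pref.length : Nat) : Int)).flatMap (pvContrib b)) := by
  intro suf
  induction suf with
  | nil =>
    intro pref c x y z seen hb hseen
    simp [PySem.List.enumerate_nil, pvPk_nil]
  | cons a suf ih =>
    intro pref c x y z seen hb hseen
    rw [PySem.List.enumerate_cons]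
    simp only [List.foldl_cons, List.flatMap_cons]
    -- evaluate the first step
    have hk : seen.getD a 0 = (pref.count a : Int) := hseen a
    have hlater : PySem.List.slice (groups.getD a []) (some (seen.getD a 0 + 1)) none
        = (pvOcc b a).drop (pref.count a + 1) := by
      rw [hg a, hk, PySem.List.slice_from _ (by positivity),
        show (((List.count a pref : Nat) : Int) + 1).toNat = List.count a pref + 1 by omega]
    have hcontrib : pvContrib b ((pref.length : Int), a)
        = ((pvOcc b a).drop (pref.count a + 1)).map
            (fun j => ((pref.length : Int), j, a)) := by
      unfold pvContrib
      have : b.take ((pref.length : Int)).toNat = pref := by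
        rw [hb, Int.toNat_natCast, List.take_left]
      rw [this]
    have hstep : (c + PySem.List.len (PySem.List.slice (groups.getD a [])
            (some (seen.getD a 0 + 1)) none),
          x ++ List.replicate (PySem.List.slice (groups.getD a [])
            (some (seen.getD a 0 + 1)) none).length ((pref.length : Nat) : Int),
          y ++ PySem.List.slice (groups.getD a []) (some (seen.getD a 0 + 1)) none,
          z ++ List.replicate (PySem.List.slice (groups.getD a [])
            (some (seen.getD a 0 + 1)) none).length a)
        = pvPk (c, x, y, z) (pvContrib b ((pref.length : Int), a)) := by
      rw [hcontrib, hlater]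
      simp [pvPk, PySem.List.len, Function.comp_def, List.map_const', List.map_drop]
    have hseen' : ∀ v, (seen.insert a (seen.getD a 0 + 1)).getD v 0
        = ((pref ++ [a]).count v : Int) := by
      intro v
      rw [PySem.Dict.getD_insert]
      by_cases h : v = a
      · subst h
        rw [if_pos rfl, hk, List.count_append]
        simp
      · rw [if_neg h, hseen v, List.count_append]
        simp [Ne.symm h]
    have hb' : b = (pref ++ [a]) ++ suf := by rw [hb]; simp
    have hlen' : ((pref.length : Nat) : Int) + 1 = (((pref ++ [a]).length : Nat) : Int) := by
      simp
    have := ih (pref ++ [a]) (c + PySem.List.len (PySem.List.slice (groups.getD a [])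
        (some (seen.getD a 0 + 1)) none))
      (x ++ List.replicate (PySem.List.slice (groups.getD a [])
        (some (seen.getD a 0 + 1)) none).length ((pref.length : Nat) : Int))
      (y ++ PySem.List.slice (groups.getD a []) (some (seen.getD a 0 + 1)) none)
      (z ++ List.replicate (PySem.List.slice (groups.getD a [])
        (some (seen.getD a 0 + 1)) none).length a)
      (seen.insert a (seen.getD a 0 + 1)) hb' hseen'
    rw [hlen']
    rw [this, hstep, pvPk_append]

-- ===== VERDICT (by name: the statement is the Claim_ definition above) =====
theorem getSame_spec : Claim_equal_getSame := by
  unfold Claim_equal_getSame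
  intro b _
  unfold Spec_getSame
  -- B's side
  show getSame b = getSame_alt b
  unfold getSame_alt
  have hB := pvB_fold b _ (pvGroups_getD b) b [] 0 [] [] [] PySem.Dict.empty (by simp)
    (by intro v; simp [PySem.Dict.getD_empty])
  simp only [List.length_nil, Nat.cast_zero] at hB
  rw [pvA_eq b, hB]
  -- the two flatMaps are equal
  congr 1
  have hfst : PySem.List.pyRange 0 (PySem.List.len b) 1
      = (PySem.List.enumerate b 0).map (·.1) := by
    rw [PySem.List.map_fst_enumerate]
    congr 1
    simp [PySem.List.len]
  rw [hfst, List.flatMap_map]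
  refine List.flatMap_congr ?_
  intro p hp
  rw [PySem.List.mem_enumerate_iff] at hp
  obtain ⟨k, hklt, rfl⟩ := hp
  simp only [zero_add]
  have hget : PySem.List.pyGetD b ((k : Nat) : Int) 0 = b[k] := by
    rw [PySem.List.pyGetD_natCast, List.getD_eq_getElem b 0 hklt]
  rw [hget]
  unfold pvContrib
  simp only [Int.toNat_natCast]
  rw [← pvKey b k hklt]
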